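-- pv_equiv track=rewrite | github.com/oezg/Day6AdventCalendar2021 | day6_part2.py | spawn
-- ===== SOURCE A (Python) =====
-- def spawn(ctr):
--     ctr_after = {}
--     for i in range(9):
--         if i == 6:
--             ctr_after[i] = ctr.get(0, 0) + ctr.get(i + 1, 0)
--         elif i == 8:
--             ctr_after[i] = ctr.get(0, 0)
--         else:
--             ctr_after[i] = ctr.get(i + 1, 0)
--     return ctr_after
-- ===== SOURCE B (Python) =====
-- def spawn(ctr):
--     # input-driven scatter: start from an all-zero age table and distribute each
--     # input bucket to its destination age(s), instead of gathering per output age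
--     ctr_after = dict.fromkeys(range(9), 0)
--     for age, n in ctr.items():
--         if age == 0:
--             ctr_after[6] += n
--             ctr_after[8] += n
--         elif 1 <= age <= 8:
--             ctr_after[age - 1] += n
--     return ctr_after
-- ===== Notes on version B (the rewrite author's own statement) =====
-- stated objective: alternative
-- what changed: Replaces A's gather loop over the 9 output ages (each doing dict lookups with in-loop branching) by an input-driven scatter: initialise an all-zero table for ages 0-8 and make one pass over the input buckets, adding each bucket's count to its destination age(s) (age 0 feeds ages 6 and 8, age k feeds k-1, other keys ignored).
import Mathlib
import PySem

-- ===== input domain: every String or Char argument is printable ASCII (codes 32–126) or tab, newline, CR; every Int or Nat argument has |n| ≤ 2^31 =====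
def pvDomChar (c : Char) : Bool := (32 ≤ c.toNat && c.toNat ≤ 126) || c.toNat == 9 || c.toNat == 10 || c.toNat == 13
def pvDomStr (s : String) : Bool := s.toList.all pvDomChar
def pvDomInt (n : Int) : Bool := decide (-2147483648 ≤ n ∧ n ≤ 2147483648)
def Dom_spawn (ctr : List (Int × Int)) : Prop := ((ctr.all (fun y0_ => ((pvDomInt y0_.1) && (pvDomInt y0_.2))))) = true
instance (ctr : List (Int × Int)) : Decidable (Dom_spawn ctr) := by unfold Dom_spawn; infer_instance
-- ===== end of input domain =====

-- B replaces A's per-output-age gather loop (9 dict lookups with in-loop branching) by an input-driven scatter: an all-zero age table plus one pass over the input buckets distributing each to its destination age(s); return value only.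


-- ===== PORT A =====
def spawn (ctr : List (Int × Int)) : List (Int × Int) :=
  let d : PySem.Dict Int Int := PySem.Dict.mk ctr
  let ctr_after :=
    (PySem.List.pyRange 0 9 1).foldl (fun acc i =>
      if i == 6 then acc.insert i (d.getD 0 0 + d.getD (i + 1) 0)
      else if i == 8 then acc.insert i (d.getD 0 0)
      else acc.insert i (d.getD (i + 1) 0)) PySem.Dict.empty
  ctr_after.items

-- ===== PORT B =====
def spawn_alt (ctr : List (Int × Int)) : List (Int × Int) :=
  -- dict.fromkeys(range(9), 0)
  let init : PySem.Dict Int Int :=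
    (PySem.List.pyRange 0 9 1).foldl (fun acc i => acc.insert i 0) PySem.Dict.empty
  -- for age, n in ctr.items(): scatter n to the destination age(s)
  let out :=
    ctr.foldl (fun acc p =>
      if p.1 == 0 then (acc.modify 6 0 (· + p.2)).modify 8 0 (· + p.2)
      else if 1 ≤ p.1 ∧ p.1 ≤ 8 then acc.modify (p.1 - 1) 0 (· + p.2)
      else acc) init
  out.items

-- ===== PRECONDITION & SPEC =====
-- Pre_ excludes association lists with duplicate keys: they do not encode any Python dict
-- (A's parameter is a dict, whose keys are unique), so neither behaviour there is Python's.
def Pre_spawn (ctr : List (Int × Int)) : Prop := (ctr.map Prod.fst).Nodup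
instance (ctr : List (Int × Int)) : Decidable (Pre_spawn ctr) := by unfold Pre_spawn; infer_instance

def pvWitness_spawn : (List (Int × Int)) := [(0, 3), (2, 5), (7, 1)]

def Spec_spawn (ctr : List (Int × Int)) (out : List (Int × Int)) : Prop := out = spawn_alt ctr
instance (ctr : List (Int × Int)) (out : List (Int × Int)) : Decidable (Spec_spawn ctr out) := by unfold Spec_spawn; infer_instance

-- ===== CLAIM (what is proved, stated in full; the proofs are below) =====
def Claim_equal_spawn : Prop := ∀ (ctr : List (Int × Int)), Dom_spawn ctr → Pre_spawn ctr → Spec_spawn ctr (spawn ctr)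

-- ===== LEMMAS AND PROOFS =====

-- first-match lookup value of key k in the list, as a filtered sum (used to relate the two sides)
def pvS (k : Int) (L : List (Int × Int)) : Int :=
  (L.map (fun p => if p.1 = k then p.2 else 0)).sum

-- per-entry contribution of input bucket p to output age j in B's scatter pass
def pvContrib (j : Int) (p : Int × Int) : Int :=
  if p.1 = 0 ∧ (j = 6 ∨ j = 8) then p.2
  else if 1 ≤ p.1 ∧ p.1 ≤ 8 ∧ j = p.1 - 1 then p.2
  else 0

def pvC (j : Int) (L : List (Int × Int)) : Int := (L.map (pvContrib j)).sum

lemma pvS_of_not_mem (k : Int) (L : List (Int × Int)) (h : k ∉ L.map Prod.fst) :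
    pvS k L = 0 := by
  induction L with
  | nil => rfl
  | cons p rest ih =>
    simp only [List.map_cons, List.mem_cons, not_or] at h
    simp only [pvS, List.map_cons, List.sum_cons, if_neg (Ne.symm h.1)]
    simpa [pvS] using ih h.2

lemma getD_mk_eq_pvS (L : List (Int × Int)) (h : (L.map Prod.fst).Nodup) (k : Int) :
    (PySem.Dict.mk L).getD k 0 = pvS k L := by
  induction L with
  | nil => rfl
  | cons p rest ih =>
    obtain ⟨a, v⟩ := p
    simp only [List.map_cons, List.nodup_cons] at h
    by_cases hk : a = k
    · subst hk
      have hn : a ∉ rest.map Prod.fst := h.1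
      have h0 := pvS_of_not_mem a rest hn
      simp only [pvS, List.map_cons, List.sum_cons] at h0 ⊢
      simp [PySem.Dict.getD, PySem.Dict.get?_mk_cons, h0]
    · have := ih h.2
      simp only [pvS, List.map_cons, List.sum_cons, if_neg hk] at this ⊢
      simp only [PySem.Dict.getD, PySem.Dict.get?_mk_cons, show (a == k) = false from by
        simpa using hk] at this ⊢
      simpa using this

-- B's fold adds exactly pvC j to every age-j slot, for any starting dict
lemma fold_getD (L : List (Int × Int)) :
    ∀ (acc : PySem.Dict Int Int) (j : Int),
      (L.foldl (fun acc p =>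
        if p.1 == 0 then (acc.modify 6 0 (· + p.2)).modify 8 0 (· + p.2)
        else if 1 ≤ p.1 ∧ p.1 ≤ 8 then acc.modify (p.1 - 1) 0 (· + p.2)
        else acc) acc).getD j 0 = acc.getD j 0 + pvC j L := by
  induction L with
  | nil => intro acc j; simp [pvC]
  | cons p rest ih =>
    intro acc j
    simp only [List.foldl_cons]
    by_cases h0 : p.1 = 0
    · rw [if_pos (by simp [h0]), ih]
      by_cases hj8 : j = 8
      · subst hj8
        rw [PySem.Dict.getD_modify_self]
        rw [PySem.Dict.getD_modify_of_ne _ _ _ (by norm_num : (8:Int) ≠ 6)]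
        have hc : pvContrib 8 p = p.2 := by unfold pvContrib; rw [if_pos ⟨h0, by norm_num⟩]
        simp only [pvC, List.map_cons, List.sum_cons, hc]; ring
      · by_cases hj6 : j = 6
        · subst hj6
          rw [PySem.Dict.getD_modify_of_ne _ _ _ (by norm_num : (6:Int) ≠ 8)]
          rw [PySem.Dict.getD_modify_self]
          have hc : pvContrib 6 p = p.2 := by unfold pvContrib; rw [if_pos ⟨h0, by norm_num⟩]
          simp only [pvC, List.map_cons, List.sum_cons, hc]; ring
        · rw [PySem.Dict.getD_modify_of_ne _ _ _ hj8, PySem.Dict.getD_modify_of_ne _ _ _ hj6]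
          have hc : pvContrib j p = 0 := by
            unfold pvContrib
            rw [if_neg (by tauto), if_neg (by omega)]
          simp only [pvC, List.map_cons, List.sum_cons, hc]; ring
    · rw [if_neg (by simp [h0])]
      by_cases hr : 1 ≤ p.1 ∧ p.1 ≤ 8
      · rw [if_pos hr, ih]
        by_cases hj : j = p.1 - 1
        · subst hj
          rw [PySem.Dict.getD_modify_self]
          have hc : pvContrib (p.1 - 1) p = p.2 := by
            unfold pvContrib
            rw [if_neg (by tauto), if_pos ⟨hr.1, hr.2, rfl⟩]
          simp only [pvC, List.map_cons, List.sum_cons, hc]; ring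
        · rw [PySem.Dict.getD_modify_of_ne _ _ _ hj]
          have hc : pvContrib j p = 0 := by
            unfold pvContrib; rw [if_neg (by tauto), if_neg (by tauto)]
          simp only [pvC, List.map_cons, List.sum_cons, hc]; ring
      · rw [if_neg hr, ih]
        have hc : pvContrib j p = 0 := by
          unfold pvContrib; rw [if_neg (by tauto), if_neg (by omega)]
        simp only [pvC, List.map_cons, List.sum_cons, hc]; ring

-- B's fold never changes the key list: every key it touches is already present
lemma fold_keys (L : List (Int × Int)) :
    ∀ (acc : PySem.Dict Int Int), acc.keys = [0, 1, 2, 3, 4, 5, 6, 7, 8] →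
      (L.foldl (fun acc p =>
        if p.1 == 0 then (acc.modify 6 0 (· + p.2)).modify 8 0 (· + p.2)
        else if 1 ≤ p.1 ∧ p.1 ≤ 8 then acc.modify (p.1 - 1) 0 (· + p.2)
        else acc) acc).keys = [0, 1, 2, 3, 4, 5, 6, 7, 8] := by
  induction L with
  | nil => intro acc h; simpa using h
  | cons p rest ih =>
    intro acc h
    have hcont : ∀ k : Int, (0:Int) ≤ k → k ≤ 8 → acc.contains k = true := by
      intro k h1 h2
      have : k ∈ acc.keys := by rw [h]; interval_cases k <;> simp
      simpa [PySem.Dict.contains_iff_mem_keys] using this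
    simp only [List.foldl_cons]
    by_cases h0 : p.1 = 0
    · rw [if_pos (by simp [h0])]
      apply ih
      have k1 : (acc.modify 6 0 (· + p.2)).keys = acc.keys := by
        rw [PySem.Dict.keys_modify]
        exact PySem.Dict.keys_insert_of_contains _ _ (hcont 6 (by norm_num) (by norm_num))
      have hc8 : (acc.modify 6 0 (· + p.2)).contains 8 = true := by
        have : (8:Int) ∈ (acc.modify 6 0 (· + p.2)).keys := by
          rw [k1, h]; simp
        simpa [PySem.Dict.contains_iff_mem_keys] using this
      rw [PySem.Dict.keys_modify, PySem.Dict.keys_insert_of_contains _ _ hc8, k1, h]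
    · rw [if_neg (by simp [h0])]
      by_cases hr : 1 ≤ p.1 ∧ p.1 ≤ 8
      · rw [if_pos hr]
        apply ih
        rw [PySem.Dict.keys_modify, PySem.Dict.keys_insert_of_contains, h]
        exact hcont (p.1 - 1) (by omega) (by omega)
      · rw [if_neg hr]; exact ih acc h

-- ===== VERDICT (by name: the statement is the Claim_ definition above) =====
theorem spawn_spec : Claim_equal_spawn := by
  intro ctr _ hpre
  unfold Spec_spawn spawn spawn_alt
  have hS := getD_mk_eq_pvS ctr hpre
  set init : PySem.Dict Int Int :=
    (PySem.List.pyRange 0 9 1).foldl (fun acc i => acc.insert i 0) PySem.Dict.empty with hinit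
  have hkeys : init.keys = [0, 1, 2, 3, 4, 5, 6, 7, 8] := by decide
  have hinit0 : ∀ j : Int, init.getD j 0 = 0 := by
    intro j
    by_cases hj : (0:Int) ≤ j ∧ j ≤ 8
    · obtain ⟨h1, h2⟩ := hj; interval_cases j <;> decide
    · apply PySem.Dict.getD_of_not_contains
      rw [Bool.eq_false_iff]
      intro hc
      have : j ∈ init.keys := by simpa [PySem.Dict.contains_iff_mem_keys] using hc
      rw [hkeys] at this
      simp at this
      omega
  set out := ctr.foldl (fun acc p =>
      if p.1 == 0 then (acc.modify 6 0 (· + p.2)).modify 8 0 (· + p.2)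
      else if 1 ≤ p.1 ∧ p.1 ≤ 8 then acc.modify (p.1 - 1) 0 (· + p.2)
      else acc) init with hout
  have hko : out.keys = [0, 1, 2, 3, 4, 5, 6, 7, 8] := fold_keys ctr init hkeys
  have hvo : ∀ j : Int, out.getD j 0 = pvC j ctr := by
    intro j; rw [hout, fold_getD, hinit0]; ring
  have hitems := PySem.Dict.items_eq_map_keys out (by rw [hko]; decide) 0
  rw [hko] at hitems
  -- A's result as an explicit 9-entry list
  have hA : (((PySem.List.pyRange 0 9 1).foldl (fun acc i =>
      if i == 6 then acc.insert i ((PySem.Dict.mk ctr).getD 0 0 + (PySem.Dict.mk ctr).getD (i + 1) 0)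
      else if i == 8 then acc.insert i ((PySem.Dict.mk ctr).getD 0 0)
      else acc.insert i ((PySem.Dict.mk ctr).getD (i + 1) 0)) PySem.Dict.empty) :
      PySem.Dict Int Int).items =
      [(0, pvS 1 ctr), (1, pvS 2 ctr), (2, pvS 3 ctr), (3, pvS 4 ctr), (4, pvS 5 ctr),
       (5, pvS 6 ctr), (6, pvS 0 ctr + pvS 7 ctr), (7, pvS 8 ctr), (8, pvS 0 ctr)] := by
    simp only [show PySem.List.pyRange 0 9 1 = [0,1,2,3,4,5,6,7,8] from by decide]
    simp [PySem.Dict.insert, PySem.Dict.contains, PySem.Dict.empty, hS]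
  -- each scatter total pvC equals the matching gathered lookups pvS
  have hC : ∀ L : List (Int × Int),
      pvC 0 L = pvS 1 L ∧ pvC 1 L = pvS 2 L ∧ pvC 2 L = pvS 3 L ∧ pvC 3 L = pvS 4 L ∧
      pvC 4 L = pvS 5 L ∧ pvC 5 L = pvS 6 L ∧ pvC 6 L = pvS 0 L + pvS 7 L ∧
      pvC 7 L = pvS 8 L ∧ pvC 8 L = pvS 0 L := by
    intro L
    induction L with
    | nil => simp [pvC, pvS]
    | cons p rest ih =>
      obtain ⟨i1, i2, i3, i4, i5, i6, i7, i8, i9⟩ := ih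
      refine ⟨?_, ?_, ?_, ?_, ?_, ?_, ?_, ?_, ?_⟩ <;>
        simp only [pvC, pvS, List.map_cons, List.sum_cons] <;>
        [rw [show (rest.map (pvContrib 0)).sum = pvC 0 rest from rfl, i1];
         rw [show (rest.map (pvContrib 1)).sum = pvC 1 rest from rfl, i2];
         rw [show (rest.map (pvContrib 2)).sum = pvC 2 rest from rfl, i3];
         rw [show (rest.map (pvContrib 3)).sum = pvC 3 rest from rfl, i4];
         rw [show (rest.map (pvContrib 4)).sum = pvC 4 rest from rfl, i5];
         rw [show (rest.map (pvContrib 5)).sum = pvC 5 rest from rfl, i6];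
         rw [show (rest.map (pvContrib 6)).sum = pvC 6 rest from rfl, i7];
         rw [show (rest.map (pvContrib 7)).sum = pvC 7 rest from rfl, i8];
         rw [show (rest.map (pvContrib 8)).sum = pvC 8 rest from rfl, i9]] <;>
        simp only [pvS] <;>
        (unfold pvContrib; split_ifs <;> omega)
  obtain ⟨c0, c1, c2, c3, c4, c5, c6, c7, c8⟩ := hC ctr
  rw [hA]
  show _ = (ctr.foldl (fun acc p =>
      if p.1 == 0 then (acc.modify 6 0 (· + p.2)).modify 8 0 (· + p.2)
      else if 1 ≤ p.1 ∧ p.1 ≤ 8 then acc.modify (p.1 - 1) 0 (· + p.2)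
      else acc) init).items
  rw [← hout, hitems]
  simp only [List.map_cons, List.map_nil, hvo, c0, c1, c2, c3, c4, c5, c6, c7, c8]
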